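-- pv_equiv track=rewrite | github.com/ramonpereira/general-environment-redesign | domain_dependent_search/search.py | get_actions_info
-- ===== SOURCE A (Python) =====
-- def get_actions_info(plans_by_goal):
--     '''
--     input: plans for each goal
--     output: dictionary with relevant info for each action
--     '''
--     actions_info = {}
--     for goal, plans in plans_by_goal.items():
--         for plan in plans:
--             for index, action in enumerate(plan):
--                 action_g = index + 1
--                 if action not in actions_info:
--                     actions_info[action] = {}
--                     actions_info[action]['g'] = action_g
--                     actions_info[action]['num_plans_present'] = 1
--                     actions_info[action]['num_goals_present'] = [goal]
--                 else:
--                     actions_info[action]['num_plans_present'] += 1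
--                     if goal not in actions_info[action]['num_goals_present']:
--                         actions_info[action]['num_goals_present'].append(goal)
--                     if actions_info[action]['g'] < action_g:
--                         # Here I'm assuming we take the max if an action appears in different indices across plans
--                         actions_info[action]['g'] = action_g
--     for action, info in actions_info.items():
--         actions_info[action]['num_goals_present'] = len(info['num_goals_present'])
--     return actions_info
-- ===== SOURCE B (Python) =====
-- def get_actions_info(plans_by_goal):
--     # Pass 1: gather, per action, every 1-based position and every goal it occurs under.
--     table = {}
--     for goal, plans in plans_by_goal.items():
--         for plan in plans:
--             for index, action in enumerate(plan):
--                 idxs, goals = table.setdefault(action, ([], []))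
--                 idxs.append(index + 1)
--                 goals.append(goal)
--     # Pass 2: reduce each gathered record to the three statistics.
--     return {action: {'g': max(idxs),
--                      'num_plans_present': len(idxs),
--                      'num_goals_present': len(set(goals))}
--             for action, (idxs, goals) in table.items()}
-- ===== Notes on version B (the rewrite author's own statement) =====
-- stated objective: faster
-- what changed: Replaces A's branch-heavy initialize-or-update single pass with a gather pass that unconditionally appends each action's 1-based position and goal to a table, followed by a reduce pass computing max(indices), len(indices) and len(set(goals)) per action.
import Mathlib
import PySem

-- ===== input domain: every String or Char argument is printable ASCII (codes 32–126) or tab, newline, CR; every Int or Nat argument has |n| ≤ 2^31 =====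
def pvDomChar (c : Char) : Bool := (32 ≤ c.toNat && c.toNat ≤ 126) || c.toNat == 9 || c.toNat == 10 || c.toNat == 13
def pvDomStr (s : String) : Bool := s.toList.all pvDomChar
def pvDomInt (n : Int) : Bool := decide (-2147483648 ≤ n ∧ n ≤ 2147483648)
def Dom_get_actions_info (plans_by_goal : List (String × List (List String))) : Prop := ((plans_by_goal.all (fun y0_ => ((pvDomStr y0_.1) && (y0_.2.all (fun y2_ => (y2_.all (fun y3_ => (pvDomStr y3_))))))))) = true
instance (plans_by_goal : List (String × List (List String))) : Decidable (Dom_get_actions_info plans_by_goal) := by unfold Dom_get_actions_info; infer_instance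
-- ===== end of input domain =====

-- B replaces A's branch-heavy incremental update with a gather pass (all positions and goals
-- per action) followed by a reduce pass (max / len / len∘set); objective: simpler decomposition.

-- ===== PORT A =====
-- body of A's innermost loop: one (index, action) occurrence under goal `goal`
def pvAStep (goal : String) (actions_info : PySem.Dict String (Int × Int × List String))
    (ia : Int × String) : PySem.Dict String (Int × Int × List String) :=
  let action_g : Int := ia.1 + 1
  if actions_info.contains ia.2 = false then
    actions_info.insert ia.2 (action_g, 1, [goal])
  else
    let info := actions_info.getD ia.2 (0, 0, [])
    let info := (info.1, info.2.1 + 1, info.2.2)                                  -- num_plans_present += 1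
    let info := if info.2.2.contains goal then info
                else (info.1, info.2.1, info.2.2 ++ [goal])                       -- append goal if new
    let info := if info.1 < action_g then (action_g, info.2.1, info.2.2) else info -- keep the max g
    actions_info.insert ia.2 info

def get_actions_info (plans_by_goal : List (String × List (List String))) : List (String × List (String × Int)) :=
  let actions_info : PySem.Dict String (Int × Int × List String) :=
    plans_by_goal.foldl (fun actions_info gp =>
      gp.2.foldl (fun actions_info plan =>
        (PySem.List.enumerate plan).foldl (pvAStep gp.1) actions_info)
        actions_info)
      PySem.Dict.empty
  -- final loop: replace the goal list by its length; rendered as the returned dict's items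
  actions_info.items.map (fun p =>
    (p.1, [("g", p.2.1), ("num_plans_present", p.2.2.1), ("num_goals_present", (p.2.2.2.length : Int))]))

-- ===== PORT B =====
-- body of B's gather loop: append position and goal unconditionally (setdefault + append)
def pvBStep (goal : String) (table : PySem.Dict String (List Int × List String))
    (ia : Int × String) : PySem.Dict String (List Int × List String) :=
  let cur := table.getD ia.2 ([], [])
  table.insert ia.2 (cur.1 ++ [ia.1 + 1], cur.2 ++ [goal])

def get_actions_info_alt (plans_by_goal : List (String × List (List String))) : List (String × List (String × Int)) :=
  let table : PySem.Dict String (List Int × List String) :=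
    plans_by_goal.foldl (fun table gp =>
      gp.2.foldl (fun table plan =>
        (PySem.List.enumerate plan).foldl (pvBStep gp.1) table)
        table)
      PySem.Dict.empty
  table.items.map (fun p =>
    (p.1, [("g", (PySem.List.max? p.2.1 id).getD 0),
           ("num_plans_present", (p.2.1.length : Int)),
           ("num_goals_present", ((PySem.Set.ofList p.2.2).length : Int))]))

-- ===== PRECONDITION & SPEC =====
def Spec_get_actions_info (plans_by_goal : List (String × List (List String))) (out : List (String × List (String × Int))) : Prop := out = get_actions_info_alt plans_by_goal
instance (plans_by_goal : List (String × List (List String))) (out : List (String × List (String × Int))) : Decidable (Spec_get_actions_info plans_by_goal out) := by unfold Spec_get_actions_info; infer_instance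

-- ===== CLAIM (what is proved, stated in full; the proofs are below) =====
def Claim_equal_get_actions_info : Prop := ∀ (plans_by_goal : List (String × List (List String))), Dom_get_actions_info plans_by_goal → Spec_get_actions_info plans_by_goal (get_actions_info plans_by_goal)

-- ===== LEMMAS AND PROOFS =====

-- relation between A's per-action record and B's gathered record
def pvRelV (a : Int × Int × List String) (b : List Int × List String) : Prop :=
  PySem.List.max? b.1 id = some a.1 ∧ a.2.1 = (b.1.length : Int) ∧ a.2.2 = PySem.Set.ofList b.2

-- loop invariant: same keys in the same order, related values, unique keys
def pvInv (d : PySem.Dict String (Int × Int × List String))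
    (t : PySem.Dict String (List Int × List String)) : Prop :=
  t.keys.Nodup ∧ List.Forall₂ (fun p q => p.1 = q.1 ∧ pvRelV p.2 q.2) d.items t.items

lemma pv_max?_append_singleton (is : List Int) (v : Int) :
    PySem.List.max? (is ++ [v]) id =
      match PySem.List.max? is id with
      | none => some v
      | some m => if m < v then some v else some m := by
  simp only [PySem.List.max?, List.foldl_append, List.foldl_cons, List.foldl_nil, id_eq]
  split <;> simp_all

lemma pv_ofList_append_singleton {α : Type} [BEq α] (xs : List α) (x : α) :
    PySem.Set.ofList (xs ++ [x]) = PySem.Set.add (PySem.Set.ofList xs) x := by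
  rw [PySem.Set.ofList_eq_foldl, PySem.Set.ofList_eq_foldl, List.foldl_append]
  rfl

lemma pv_forall2_append {α β : Type} {R : α → β → Prop} :
    ∀ {xs ys us vs}, List.Forall₂ R xs ys → List.Forall₂ R us vs →
    List.Forall₂ R (xs ++ us) (ys ++ vs) := by
  intro xs ys us vs h
  induction h with
  | nil => intro h2; exact h2
  | cons hpq _ ih => intro h2; exact List.Forall₂.cons hpq (ih h2)

lemma pv_forall2_map {α β γ δ : Type} {R : α → β → Prop} {S : γ → δ → Prop}
    {f : α → γ} {g : β → δ} :
    ∀ {xs : List α} {ys : List β}, List.Forall₂ R xs ys →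
    (∀ p q, p ∈ xs → q ∈ ys → R p q → S (f p) (g q)) →
    List.Forall₂ S (xs.map f) (ys.map g) := by
  intro xs ys h
  induction h with
  | nil => intro _; exact List.Forall₂.nil
  | cons hpq _ ih =>
      intro hmem
      exact List.Forall₂.cons (hmem _ _ (by simp) (by simp) hpq)
        (ih (fun p q hp hq hr => hmem p q (by simp [hp]) (by simp [hq]) hr))

lemma pv_fst_map_eq {xs : List (String × (Int × Int × List String))}
    {ys : List (String × (List Int × List String))}
    (h : List.Forall₂ (fun p q => p.1 = q.1 ∧ pvRelV p.2 q.2) xs ys) :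
    xs.map (·.1) = ys.map (·.1) := by
  induction h with
  | nil => rfl
  | cons hpq _ ih => simp only [List.map_cons, hpq.1, ih]

lemma pv_step_inv (goal : String) (ia : Int × String)
    (d : PySem.Dict String (Int × Int × List String))
    (t : PySem.Dict String (List Int × List String))
    (h : pvInv d t) : pvInv (pvAStep goal d ia) (pvBStep goal t ia) := by
  obtain ⟨hnd, hf⟩ := h
  have hkeys : d.keys = t.keys := pv_fst_map_eq hf
  have hdnd : d.keys.Nodup := hkeys ▸ hnd
  have hcont : d.contains ia.2 = t.contains ia.2 := by
    classical
    rw [PySem.Dict.contains_eq_decide_mem_keys, PySem.Dict.contains_eq_decide_mem_keys, hkeys]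
  constructor
  · exact PySem.Dict.nodup_keys_insert _ _ _ hnd
  · by_cases hc : t.contains ia.2 = true
    · -- existing key: both sides rewrite the matching entry in place
      rw [pvAStep, pvBStep]
      simp only [hcont, hc, Bool.true_eq_false, if_false]
      rw [PySem.Dict.items_insert_of_contains _ _ (hcont ▸ hc),
          PySem.Dict.items_insert_of_contains _ _ hc]
      refine pv_forall2_map hf ?_
      intro p q hp hq hpq
      obtain ⟨hk1, hmax, hlen, hgoals⟩ := hpq
      by_cases hke : p.1 = ia.2
      · have hq1 : q.1 = ia.2 := hk1 ▸ hke
        have hpb : (p.1 == ia.2) = true := by simp [hke]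
        have hqb : (q.1 == ia.2) = true := by simp [hq1]
        have hpm : (ia.2, p.2) ∈ d.items := by rw [← hke]; simpa using hp
        have hqm : (ia.2, q.2) ∈ t.items := by rw [← hq1]; simpa using hq
        have hda : d.getD ia.2 (0, 0, []) = p.2 :=
          PySem.Dict.getD_of_mem_items d hpm hdnd _
        have htb : t.getD ia.2 ([], []) = q.2 :=
          PySem.Dict.getD_of_mem_items t hqm hnd _
        simp only [hpb, hqb, if_true]
        refine ⟨by trivial, ?_, ?_, ?_⟩
        · simp only [hda, htb, pv_max?_append_singleton, hmax]
          split_ifs <;> simp_all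
        · simp only [hda, htb]
          split_ifs <;> simp [hlen]
        · simp only [hda, htb, pv_ofList_append_singleton, PySem.Set.add,
            PySem.Set.contains, hgoals]
          split_ifs <;> simp_all
      · have hq1 : ¬ (q.1 = ia.2) := hk1 ▸ hke
        have hpb : (p.1 == ia.2) = false := by simp [hke]
        have hqb : (q.1 == ia.2) = false := by simp [hq1]
        simp only [hpb, hqb, Bool.false_eq_true, if_false]
        exact ⟨hk1, hmax, hlen, hgoals⟩
    · -- new key: both sides append a fresh entry
      have hc' : t.contains ia.2 = false := by simpa using hc
      rw [pvAStep, pvBStep]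
      simp only [hcont, hc', if_true]
      rw [PySem.Dict.getD_of_not_contains t ([], []) hc',
          PySem.Dict.items_insert_of_not_contains _ _ (hcont ▸ hc'),
          PySem.Dict.items_insert_of_not_contains _ _ hc']
      have hrel : pvRelV (ia.1 + 1, 1, [goal]) ([ia.1 + 1], [goal]) := by
        refine ⟨?_, ?_, ?_⟩
        · simp [PySem.List.max?]
        · simp
        · simp [PySem.Set.ofList_eq_foldl, PySem.Set.add, PySem.Set.contains]
      exact pv_forall2_append hf (List.Forall₂.cons ⟨rfl, hrel⟩ List.Forall₂.nil)

lemma pv_foldl_rel {α γ δ : Type} (R : γ → δ → Prop) (f : γ → α → γ) (g : δ → α → δ)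
    (hstep : ∀ c e a, R c e → R (f c a) (g e a)) :
    ∀ (l : List α) (c : γ) (e : δ), R c e → R (l.foldl f c) (l.foldl g e) := by
  intro l
  induction l with
  | nil => intro c e h; exact h
  | cons x xs ih => intro c e h; exact ih _ _ (hstep _ _ _ h)

lemma pv_inv_final (plans_by_goal : List (String × List (List String))) :
    pvInv
      (plans_by_goal.foldl (fun actions_info gp =>
        gp.2.foldl (fun actions_info plan =>
          (PySem.List.enumerate plan).foldl (pvAStep gp.1) actions_info) actions_info)
        PySem.Dict.empty)
      (plans_by_goal.foldl (fun table gp =>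
        gp.2.foldl (fun table plan =>
          (PySem.List.enumerate plan).foldl (pvBStep gp.1) table) table)
        PySem.Dict.empty) := by
  refine pv_foldl_rel pvInv _ _ ?_ plans_by_goal _ _ ?_
  · intro c e gp h
    refine pv_foldl_rel pvInv _ _ ?_ gp.2 _ _ h
    intro c e plan h
    exact pv_foldl_rel pvInv _ _ (fun c e ia h => pv_step_inv gp.1 ia c e h)
      (PySem.List.enumerate plan) _ _ h
  · exact ⟨PySem.Dict.nodup_keys_empty, by simp [PySem.Dict.empty]⟩

lemma pv_final_map {xs : List (String × (Int × Int × List String))}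
    {ys : List (String × (List Int × List String))}
    (h : List.Forall₂ (fun p q => p.1 = q.1 ∧ pvRelV p.2 q.2) xs ys) :
    xs.map (fun p =>
        (p.1, [("g", p.2.1), ("num_plans_present", p.2.2.1),
               ("num_goals_present", (p.2.2.2.length : Int))])) =
    ys.map (fun p =>
        (p.1, [("g", (PySem.List.max? p.2.1 id).getD 0),
               ("num_plans_present", (p.2.1.length : Int)),
               ("num_goals_present", ((PySem.Set.ofList p.2.2).length : Int))])) := by
  induction h with
  | nil => rfl
  | cons hpq _ ih =>
      obtain ⟨hk, hmax, hlen, hgoals⟩ := hpq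
      simp only [List.map_cons, ih, List.cons.injEq, and_true]
      exact Prod.ext hk (by simp [hmax, hlen, hgoals])

-- ===== VERDICT (by name: the statement is the Claim_ definition above) =====
theorem get_actions_info_spec : Claim_equal_get_actions_info := by
  intro plans_by_goal _
  unfold Spec_get_actions_info get_actions_info get_actions_info_alt
  exact pv_final_map (pv_inv_final plans_by_goal).2
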